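-- pv_equiv track=rewrite | github.com/kq-li/stuy | pclassic/2017s/CopsRunIntoEachOther.py | countEvenArrays
-- ===== SOURCE A (Python) =====
-- def countEvenArrays(matrix):
--     # print matrix
--     ans = 0
--     M = len(matrix)
--     N = len(matrix[0])
--     for startx in range(M):
--         for starty in range(N):
--             for endx in range(startx, M):
--                 for endy in range(starty, N):
--                     # print "(%d, %d) to (%d, %d)" % (startx, starty, endx, endy)
--                     if sum([matrix[x][y] for x in range(startx, endx + 1) for y in range(starty, endy + 1)]) % 2 == 0:
--                         ans += 1
--
--     return ans
-- ===== SOURCE B (Python) =====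
-- def countEvenArrays(matrix):
--     M = len(matrix)
--     N = len(matrix[0])
--     # P[i][j] = sum of matrix[x][y] over x < i, y < j (first N columns only)
--     P = [[0] * (N + 1)]
--     for i in range(M):
--         row = [0]
--         acc = 0
--         for j in range(N):
--             acc += matrix[i][j]
--             row.append(P[i][j + 1] + acc)
--         P.append(row)
--     ans = 0
--     for sx in range(M):
--         for ex in range(sx, M):
--             for sy in range(N):
--                 for ey in range(sy, N):
--                     s = P[ex + 1][ey + 1] - P[sx][ey + 1] - P[ex + 1][sy] + P[sx][sy]
--                     if s % 2 == 0:
--                         ans += 1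
--     return ans
-- ===== Notes on version B (the rewrite author's own statement) =====
-- stated objective: faster
-- what changed: B builds a 2D prefix-sum table once and computes each rectangle sum (hence its parity) in O(1) lookups, instead of re-summing all elements of every rectangle.
import Mathlib
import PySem

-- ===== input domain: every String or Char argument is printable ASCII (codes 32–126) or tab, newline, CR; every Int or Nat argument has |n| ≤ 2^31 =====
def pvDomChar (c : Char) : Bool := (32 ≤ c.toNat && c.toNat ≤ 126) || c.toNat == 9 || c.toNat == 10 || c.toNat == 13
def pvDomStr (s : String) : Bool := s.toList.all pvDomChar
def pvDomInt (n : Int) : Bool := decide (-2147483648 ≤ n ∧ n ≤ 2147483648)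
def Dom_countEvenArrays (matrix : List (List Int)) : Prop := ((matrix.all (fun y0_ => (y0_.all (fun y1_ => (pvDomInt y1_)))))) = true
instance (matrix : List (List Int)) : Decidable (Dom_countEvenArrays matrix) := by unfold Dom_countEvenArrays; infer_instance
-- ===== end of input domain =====

-- B replaces A's per-rectangle element re-summation by a 2D prefix-sum table with O(1) rectangle sums (objective: faster).


-- ===== PORT A =====
def countEvenArrays (matrix : List (List Int)) : Int :=
  let M : Int := matrix.length
  let N : Int := (PySem.List.pyGetD matrix 0 []).length
  (PySem.List.pyRange 0 M 1).foldl (fun ans startx =>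
    (PySem.List.pyRange 0 N 1).foldl (fun ans starty =>
      (PySem.List.pyRange startx M 1).foldl (fun ans endx =>
        (PySem.List.pyRange starty N 1).foldl (fun ans endy =>
          if PySem.Int.mod
              (((PySem.List.pyRange startx (endx + 1) 1).flatMap (fun x =>
                (PySem.List.pyRange starty (endy + 1) 1).map (fun y =>
                  PySem.List.pyGetD (PySem.List.pyGetD matrix x []) y 0))).foldl (· + ·) 0)
              2 == 0
          then ans + 1 else ans) ans) ans) ans) 0

-- ===== PORT B =====
def countEvenArrays_alt (matrix : List (List Int)) : Int :=
  let M : Int := matrix.length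
  let N : Int := (PySem.List.pyGetD matrix 0 []).length
  let P : List (List Int) :=
    (PySem.List.pyRange 0 M 1).foldl (fun P i =>
      let st := (PySem.List.pyRange 0 N 1).foldl (fun (st : List Int × Int) j =>
        let acc := st.2 + PySem.List.pyGetD (PySem.List.pyGetD matrix i []) j 0
        (st.1 ++ [PySem.List.pyGetD (PySem.List.pyGetD P i []) (j + 1) 0 + acc], acc))
        ([0], 0)
      P ++ [st.1]) [PySem.List.pyRepeat [0] (N + 1)]
  (PySem.List.pyRange 0 M 1).foldl (fun ans sx =>
    (PySem.List.pyRange sx M 1).foldl (fun ans ex =>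
      (PySem.List.pyRange 0 N 1).foldl (fun ans sy =>
        (PySem.List.pyRange sy N 1).foldl (fun ans ey =>
          if PySem.Int.mod
              (PySem.List.pyGetD (PySem.List.pyGetD P (ex + 1) []) (ey + 1) 0
               - PySem.List.pyGetD (PySem.List.pyGetD P sx []) (ey + 1) 0
               - PySem.List.pyGetD (PySem.List.pyGetD P (ex + 1) []) sy 0
               + PySem.List.pyGetD (PySem.List.pyGetD P sx []) sy 0)
              2 == 0
          then ans + 1 else ans) ans) ans) ans) 0

-- ===== PRECONDITION & SPEC =====
-- Pre_ excludes exactly the inputs where A raises IndexError: the empty matrix (len(matrix[0]))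
-- and matrices where some row is shorter than row 0 (matrix[x][y] with y < len(matrix[0])).
def Pre_countEvenArrays (matrix : List (List Int)) : Prop :=
  matrix ≠ [] ∧ ∀ row ∈ matrix, (matrix.headD []).length ≤ row.length
instance (matrix : List (List Int)) : Decidable (Pre_countEvenArrays matrix) := by
  unfold Pre_countEvenArrays; infer_instance
def pvWitness_countEvenArrays : List (List Int) := [[1, 2], [3, 4]]

def Spec_countEvenArrays (matrix : List (List Int)) (out : Int) : Prop := out = countEvenArrays_alt matrix
instance (matrix : List (List Int)) (out : Int) : Decidable (Spec_countEvenArrays matrix out) := by unfold Spec_countEvenArrays; infer_instance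

-- ===== CLAIM (what is proved, stated in full; the proofs are below) =====
def Claim_equal_countEvenArrays : Prop := ∀ (matrix : List (List Int)), Dom_countEvenArrays matrix → Pre_countEvenArrays matrix → Spec_countEvenArrays matrix (countEvenArrays matrix)

-- ===== LEMMAS AND PROOFS =====

def pvElem (m : List (List Int)) (x y : Int) : Int :=
  PySem.List.pyGetD (PySem.List.pyGetD m x []) y 0

def pvT (m : List (List Int)) (a b c d : Int) : Int :=
  ((PySem.List.pyRange a b 1).map (fun x =>
    ((PySem.List.pyRange c d 1).map (fun y => pvElem m x y)).sum)).sum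

lemma pvSwap (l1 l2 : List Int) (f : Int → Int → Int) :
    (l1.map (fun a => (l2.map (f a)).sum)).sum = (l2.map (fun b => (l1.map (fun a => f a b)).sum)).sum := by
  induction l1 with
  | nil => simp
  | cons a t ih => simp [ih]

lemma pvT_split_outer (m : List (List Int)) (a k b c d : Int) (h1 : a ≤ k) (h2 : k ≤ b) :
    pvT m a b c d = pvT m a k c d + pvT m k b c d := by
  unfold pvT
  rw [PySem.List.pyRange_one_append a k b h1 h2, List.map_append, List.sum_append]

lemma pvT_split_inner (m : List (List Int)) (a b c k d : Int) (h1 : c ≤ k) (h2 : k ≤ d) :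
    pvT m a b c d = pvT m a b c k + pvT m a b k d := by
  unfold pvT
  rw [List.map_congr_left (fun x _ => by
    rw [PySem.List.pyRange_one_append c k d h1 h2, List.map_append, List.sum_append]),
    PySem.List.sum_map_add_int]

lemma pvT_rect (m : List (List Int)) (sx b sy d : Int)
    (hsx : 0 ≤ sx) (hb : sx ≤ b) (hsy : 0 ≤ sy) (hd : sy ≤ d) :
    pvT m sx b sy d =
      pvT m 0 b 0 d - pvT m 0 sx 0 d - pvT m 0 b 0 sy + pvT m 0 sx 0 sy := by
  have h1 := pvT_split_outer m 0 sx b 0 d hsx hb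
  have h2 := pvT_split_inner m sx b 0 sy d hsy hd
  have h3 := pvT_split_outer m 0 sx b 0 sy hsx hb
  omega

lemma pvA_sum (m : List (List Int)) (a b c d : Int) :
    ((PySem.List.pyRange a b 1).flatMap (fun x =>
      (PySem.List.pyRange c d 1).map (fun y => pvElem m x y))).foldl (· + ·) 0 = pvT m a b c d := by
  rw [← List.sum_eq_foldl]
  unfold pvT
  induction PySem.List.pyRange a b 1 with
  | nil => simp
  | cons x t ih => simp [ih]

lemma pvIdx {α : Type} (g : Nat → α) (len i : Nat) (hi : i < len) (d : α) :
    PySem.List.pyGetD ((List.range len).map g) (i : Int) d = g i := by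
  simp [PySem.List.pyGetD_natCast, List.getD_eq_getElem?_getD, hi]

-- row sum prefix
lemma pvRowPref (m : List (List Int)) (k : Int) (n : Nat) :
    ((PySem.List.pyRange 0 ((n : Int) + 1) 1).map (fun y => pvElem m k y)).sum
      = ((PySem.List.pyRange 0 (n : Int) 1).map (fun y => pvElem m k y)).sum + pvElem m k n := by
  rw [PySem.List.pyRange_one_succ_right (by positivity)]
  simp

lemma pvT_single (m : List (List Int)) (k c d : Int) :
    pvT m k (k + 1) c d = ((PySem.List.pyRange c d 1).map (fun y => pvElem m k y)).sum := by
  unfold pvT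
  rw [PySem.List.pyRange_one_singleton]
  simp

lemma pvT_row_step (m : List (List Int)) (k : Int) (d : Int) (hk : 0 ≤ k) :
    pvT m 0 (k + 1) 0 d = pvT m 0 k 0 d + ((PySem.List.pyRange 0 d 1).map (fun y => pvElem m k y)).sum := by
  rw [pvT_split_outer m 0 k (k + 1) 0 d hk (by omega), pvT_single]

lemma pvT_empty_inner (m : List (List Int)) (a b c : Int) : pvT m a b c c = 0 := by
  unfold pvT
  simp [PySem.List.pyRange_one_eq_nil (le_refl c)]

lemma pvInner (m : List (List Int)) (k : Int) (hk : 0 ≤ k) (r : List Int) (Nlen : Nat)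
    (hr : ∀ j : Nat, j ≤ Nlen → PySem.List.pyGetD r (j : Int) 0 = pvT m 0 k 0 (j : Int))
    (n : Nat) (hn : n ≤ Nlen) :
    (PySem.List.pyRange 0 (n : Int) 1).foldl (fun (st : List Int × Int) j =>
        let acc := st.2 + PySem.List.pyGetD (PySem.List.pyGetD m k []) j 0
        (st.1 ++ [PySem.List.pyGetD r (j + 1) 0 + acc], acc))
      ([0], 0)
    = ((List.range (n + 1)).map (fun (j : Nat) => pvT m 0 (k + 1) 0 (j : Int)),
       ((PySem.List.pyRange 0 (n : Int) 1).map (fun y => pvElem m k y)).sum) := by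
  induction n with
  | zero =>
      simp [PySem.List.pyRange_one_eq_nil (le_refl 0), pvT_empty_inner]
  | succ n ih =>
      have hn' : n ≤ Nlen := by omega
      have hcast : ((n + 1 : Nat) : Int) = (n : Int) + 1 := by push_cast; ring
      rw [hcast, PySem.List.pyRange_one_succ_right (by omega), List.foldl_append,
        ih hn', List.foldl_cons, List.foldl_nil]
      have hr' := hr (n + 1) (by omega)
      rw [hcast] at hr'
      simp only [Prod.mk.injEq]
      have hrow : (List.map (fun y => pvElem m k y) (PySem.List.pyRange 0 ((n : Int) + 1))).sum
          = (List.map (fun y => pvElem m k y) (PySem.List.pyRange 0 (n : Int))).sum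
            + PySem.List.pyGetD (PySem.List.pyGetD m k []) ((n : Int)) 0 := by
        rw [pvRowPref m k n]; unfold pvElem; rfl
      refine ⟨?_, ?_⟩
      · conv_rhs => rw [List.range_succ]
        simp only [List.map_append, List.map_cons, List.map_nil]
        rw [hr']
        congr 1
        rw [hcast, pvT_row_step m k ((n : Int) + 1) hk, hrow]
      · rw [List.map_append, List.sum_append]
        simp [pvElem]

lemma pvT_empty_outer (m : List (List Int)) (a c d : Int) : pvT m a a c d = 0 := by
  unfold pvT
  simp [PySem.List.pyRange_one_eq_nil (le_refl a)]

lemma pvTable (m : List (List Int)) (k : Nat) :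
    (PySem.List.pyRange 0 (k : Int) 1).foldl (fun P i =>
      let st := (PySem.List.pyRange 0 (((PySem.List.pyGetD m 0 []).length : Int)) 1).foldl
        (fun (st : List Int × Int) j =>
          let acc := st.2 + PySem.List.pyGetD (PySem.List.pyGetD m i []) j 0
          (st.1 ++ [PySem.List.pyGetD (PySem.List.pyGetD P i []) (j + 1) 0 + acc], acc))
        ([0], 0)
      P ++ [st.1]) [PySem.List.pyRepeat [0] (((PySem.List.pyGetD m 0 []).length : Int) + 1)]
    = (List.range (k + 1)).map (fun (i : Nat) =>
        (List.range ((PySem.List.pyGetD m 0 []).length + 1)).map (fun (j : Nat) => pvT m 0 (i : Int) 0 (j : Int))) := by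
  induction k with
  | zero =>
      rw [PySem.List.pyRange_one_eq_nil (a := 0) (b := ((0 : Nat) : Int)) (by omega), List.foldl_nil]
      simp [PySem.List.pyRepeat_singleton, pvT_empty_outer]
  | succ k ih =>
      have hcast : ((k + 1 : Nat) : Int) = (k : Int) + 1 := by push_cast; ring
      rw [hcast, PySem.List.pyRange_one_succ_right (by omega), List.foldl_append, ih,
        List.foldl_cons, List.foldl_nil]
      have hr : ∀ j : Nat, j ≤ (PySem.List.pyGetD m 0 []).length →
          PySem.List.pyGetD (PySem.List.pyGetD
            ((List.range (k + 1)).map (fun (i : Nat) =>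
              (List.range ((PySem.List.pyGetD m 0 []).length + 1)).map (fun (j : Nat) => pvT m 0 (i : Int) 0 (j : Int))))
            (k : Int) []) (j : Int) 0 = pvT m 0 (k : Int) 0 (j : Int) := by
        intro j hj
        rw [pvIdx _ (k + 1) k (by omega), pvIdx _ _ j (by omega)]
      rw [pvInner m (k : Int) (by omega) _ ((PySem.List.pyGetD m 0 []).length) hr
        ((PySem.List.pyGetD m 0 []).length) (le_refl _)]
      rw [List.range_succ (n := k + 1)]
      simp [hcast]

lemma pvA_sum' (m : List (List Int)) (a b c d : Int) :
    ((PySem.List.pyRange a b 1).flatMap (fun x =>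
      (PySem.List.pyRange c d 1).map (fun y =>
        PySem.List.pyGetD (PySem.List.pyGetD m x []) y 0))).foldl (· + ·) 0 = pvT m a b c d := by
  rw [← pvA_sum m a b c d]
  unfold pvElem
  rfl

lemma pvA_form (m : List (List Int)) :
    countEvenArrays m =
      ((PySem.List.pyRange 0 (m.length : Int) 1).map (fun sx =>
        ((PySem.List.pyRange 0 ((PySem.List.pyGetD m 0 []).length : Int) 1).map (fun sy =>
          ((PySem.List.pyRange sx (m.length : Int) 1).map (fun ex =>
            (((PySem.List.pyRange sy ((PySem.List.pyGetD m 0 []).length : Int) 1).countP (fun ey =>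
              PySem.Int.mod (pvT m sx (ex + 1) sy (ey + 1)) 2 == 0) : Nat) : Int))).sum)).sum)).sum := by
  simp only [countEvenArrays, pvA_sum', PySem.List.foldl_if_add_one, PySem.List.foldl_add,
    zero_add]

lemma pvB_form (m : List (List Int)) :
    countEvenArrays_alt m =
      ((PySem.List.pyRange 0 (m.length : Int) 1).map (fun sx =>
        ((PySem.List.pyRange sx (m.length : Int) 1).map (fun ex =>
          ((PySem.List.pyRange 0 ((PySem.List.pyGetD m 0 []).length : Int) 1).map (fun sy =>
            (((PySem.List.pyRange sy ((PySem.List.pyGetD m 0 []).length : Int) 1).countP (fun ey =>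
              let TS := (List.range (m.length + 1)).map (fun (i : Nat) =>
                (List.range ((PySem.List.pyGetD m 0 []).length + 1)).map (fun (j : Nat) => pvT m 0 (i : Int) 0 (j : Int)))
              PySem.Int.mod
                (PySem.List.pyGetD (PySem.List.pyGetD TS (ex + 1) []) (ey + 1) 0
                 - PySem.List.pyGetD (PySem.List.pyGetD TS sx []) (ey + 1) 0
                 - PySem.List.pyGetD (PySem.List.pyGetD TS (ex + 1) []) sy 0
                 + PySem.List.pyGetD (PySem.List.pyGetD TS sx []) sy 0)
                2 == 0) : Nat) : Int))).sum)).sum)).sum := by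
  simp only [countEvenArrays_alt, pvTable, PySem.List.foldl_if_add_one, PySem.List.foldl_add,
    zero_add]

lemma pvIdx' {α : Type} (g : Nat → α) (len : Nat) (i : Int) (h0 : 0 ≤ i) (hi : i < (len : Int)) (d : α) :
    PySem.List.pyGetD ((List.range len).map g) i d = g i.toNat := by
  have h : i = ((i.toNat : Nat) : Int) := (Int.toNat_of_nonneg h0).symm
  conv_lhs => rw [h]
  rw [pvIdx g len i.toNat (by omega) d]

lemma pvAB (m : List (List Int)) : countEvenArrays m = countEvenArrays_alt m := by
  rw [pvA_form, pvB_form]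
  refine congrArg List.sum (List.map_congr_left ?_)
  intro sx hsx
  obtain ⟨hsx0, hsxM⟩ := (PySem.List.mem_pyRange_one).mp hsx
  rw [pvSwap]
  refine congrArg List.sum (List.map_congr_left ?_)
  intro ex hex
  obtain ⟨hex0, hexM⟩ := (PySem.List.mem_pyRange_one).mp hex
  refine congrArg List.sum (List.map_congr_left ?_)
  intro sy hsy
  obtain ⟨hsy0, hsyN⟩ := (PySem.List.mem_pyRange_one).mp hsy
  refine congrArg _ (List.countP_congr ?_)
  intro ey hey
  obtain ⟨hey0, heyN⟩ := (PySem.List.mem_pyRange_one).mp hey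
  simp only []
  have hM1 : ∀ i : Int, 0 ≤ i → i < (m.length : Int) + 1 → ∀ j : Int, 0 ≤ j → j < ((PySem.List.pyGetD m 0 []).length : Int) + 1 →
      PySem.List.pyGetD (PySem.List.pyGetD
        ((List.range (m.length + 1)).map (fun (i : Nat) =>
          (List.range ((PySem.List.pyGetD m 0 []).length + 1)).map (fun (j : Nat) => pvT m 0 (i : Int) 0 (j : Int))))
        i []) j 0 = pvT m 0 i 0 j := by
    intro i hi0 hiM j hj0 hjN
    rw [pvIdx' _ (m.length + 1) i hi0 (by push_cast; omega), pvIdx' _ _ j hj0 (by push_cast; omega),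
      Int.toNat_of_nonneg hi0, Int.toNat_of_nonneg hj0]
  rw [hM1 (ex + 1) (by omega) (by omega) (ey + 1) (by omega) (by omega),
    hM1 sx (by omega) (by omega) (ey + 1) (by omega) (by omega),
    hM1 (ex + 1) (by omega) (by omega) sy (by omega) (by omega),
    hM1 sx (by omega) (by omega) sy (by omega) (by omega),
    ← pvT_rect m sx (ex + 1) sy (ey + 1) hsx0 (by omega) hsy0 (by omega)]

-- ===== VERDICT (by name: the statement is the Claim_ definition above) =====
theorem countEvenArrays_spec : Claim_equal_countEvenArrays := by
  intro matrix _ _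
  unfold Spec_countEvenArrays
  exact pvAB matrix
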